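-- pv_equiv track=rewrite | github.com/HuaGCS/Hahobot | hahobot/gateway/admin.py | _split_markdown_level2_sections
-- ===== SOURCE A (Python) =====
-- def _split_markdown_level2_sections(text: str) -> tuple[str, list[tuple[str, str]]]:
--     normalized = text.replace("\r\n", "\n").strip()
--     if not normalized:
--         return "", []
--
--     lines = normalized.split("\n")
--     preamble: list[str] = []
--     sections: list[tuple[str, str]] = []
--     current_heading: str | None = None
--     current_lines: list[str] = []
--
--     for line in lines:
--         if line.startswith("## "):
--             if current_heading is None:
--                 current_heading = line
--             else:
--                 sections.append((current_heading, "\n".join(current_lines).strip()))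
--                 current_heading = line
--             current_lines = []
--             continue
--
--         if current_heading is None:
--             preamble.append(line)
--         else:
--             current_lines.append(line)
--
--     if current_heading is not None:
--         sections.append((current_heading, "\n".join(current_lines).strip()))
--
--     return "\n".join(preamble).strip(), sections
-- ===== SOURCE B (Python) =====
-- def _split_markdown_level2_sections(text: str) -> tuple[str, list[tuple[str, str]]]:
--     normalized = text.replace("\r\n", "\n").strip()
--     if not normalized:
--         return "", []
--
--     lines = normalized.split("\n")
--     n = len(lines)
--
--     # scan to the first level-2 heading: everything before it is the preamble
--     i = 0
--     while i < n and not lines[i].startswith("## "):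
--         i += 1
--     preamble = "\n".join(lines[:i]).strip()
--
--     # each heading owns the slice up to the next heading (or the end)
--     sections: list[tuple[str, str]] = []
--     while i < n:
--         heading = lines[i]
--         j = i + 1
--         while j < n and not lines[j].startswith("## "):
--             j += 1
--         sections.append((heading, "\n".join(lines[i + 1:j]).strip()))
--         i = j
--     return preamble, sections
-- ===== Notes on version B (the rewrite author's own statement) =====
-- stated objective: alternative
-- what changed: Replaces A's single-pass accumulator loop with mutable current-heading/current-lines state by a boundary scan: find the first heading to slice off the preamble, then repeatedly scan to the next heading and slice out each section body.
import Mathlib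
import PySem

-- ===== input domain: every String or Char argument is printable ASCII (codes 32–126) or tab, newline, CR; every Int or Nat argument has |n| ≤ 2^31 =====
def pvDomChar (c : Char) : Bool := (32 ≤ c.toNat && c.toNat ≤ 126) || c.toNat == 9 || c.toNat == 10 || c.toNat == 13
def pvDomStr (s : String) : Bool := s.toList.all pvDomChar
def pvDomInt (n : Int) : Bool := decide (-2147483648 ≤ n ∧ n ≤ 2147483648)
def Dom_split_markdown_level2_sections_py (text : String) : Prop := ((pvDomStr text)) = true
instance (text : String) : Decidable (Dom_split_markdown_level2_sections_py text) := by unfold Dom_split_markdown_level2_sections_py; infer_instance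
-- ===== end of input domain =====

-- ===== PORT A =====
-- B replaces A's single-pass accumulator loop by a boundary scan with slices; equal results proved below.
-- the for loop of A, one recursive step per line; state = (preamble, sections, current_heading, current_lines)
def pvALoop : List String → List String → List (String × String) → Option String → List String → String × (List (String × String))
  | [], pre, secs, curh, curl =>
      match curh with
      | none => (PySem.Str.strip (PySem.Str.join "\n" pre), secs)
      | some h => (PySem.Str.strip (PySem.Str.join "\n" pre),
                   secs ++ [(h, PySem.Str.strip (PySem.Str.join "\n" curl))])
  | line :: ls, pre, secs, curh, curl =>
      if PySem.Str.startswith line "## " then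
        match curh with
        | none => pvALoop ls pre secs (some line) []
        | some h => pvALoop ls pre (secs ++ [(h, PySem.Str.strip (PySem.Str.join "\n" curl))]) (some line) []
      else
        match curh with
        | none => pvALoop ls (pre ++ [line]) secs curh curl
        | some _ => pvALoop ls pre secs curh (curl ++ [line])

def split_markdown_level2_sections_py (text : String) : String × (List (String × String)) :=
  let normalized := PySem.Str.strip (PySem.Str.replace text "\r\n" "\n")
  if normalized = "" then ("", [])
  else pvALoop ((PySem.Chars.splitOn normalized.toList "\n".toList).map String.ofList) [] [] none []

-- ===== PORT B =====
def pvBNotHeading (line : String) : Bool := !(PySem.Str.startswith line "## ")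

-- B's outer while loop: the list starts at a heading; scan to the next heading (takeWhile/dropWhile
-- are the inner 'while j < n and not heading' scan plus the slice lines[i+1:j])
def pvBSections : List String → List (String × String)
  | [] => []
  | h :: rest =>
      (h, PySem.Str.strip (PySem.Str.join "\n" (rest.takeWhile pvBNotHeading)))
        :: pvBSections (rest.dropWhile pvBNotHeading)
  termination_by ls => ls.length
  decreasing_by
    simp only [List.length_cons]
    exact Nat.lt_succ_of_le (List.length_dropWhile_le _ _)

def split_markdown_level2_sections_py_alt (text : String) : String × (List (String × String)) :=
  let normalized := PySem.Str.strip (PySem.Str.replace text "\r\n" "\n")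
  if normalized = "" then ("", [])
  else
    let lines := (PySem.Chars.splitOn normalized.toList "\n".toList).map String.ofList
    (PySem.Str.strip (PySem.Str.join "\n" (lines.takeWhile pvBNotHeading)),
     pvBSections (lines.dropWhile pvBNotHeading))

-- ===== PRECONDITION & SPEC =====
def Spec_split_markdown_level2_sections_py (text : String) (out : String × (List (String × String))) : Prop := out = split_markdown_level2_sections_py_alt text
instance (text : String) (out : String × (List (String × String))) : Decidable (Spec_split_markdown_level2_sections_py text out) := by unfold Spec_split_markdown_level2_sections_py; infer_instance

-- ===== CLAIM (what is proved, stated in full; the proofs are below) =====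
def Claim_equal_split_markdown_level2_sections_py : Prop := ∀ (text : String), Dom_split_markdown_level2_sections_py text → Spec_split_markdown_level2_sections_py text (split_markdown_level2_sections_py text)

-- ===== LEMMAS AND PROOFS =====

lemma pvALoop_some (ls : List String) (pre : List String) (secs : List (String × String))
    (h : String) (curl : List String) :
    pvALoop ls pre secs (some h) curl =
      (PySem.Str.strip (PySem.Str.join "\n" pre),
       secs ++ (h, PySem.Str.strip (PySem.Str.join "\n" (curl ++ ls.takeWhile pvBNotHeading)))
            :: pvBSections (ls.dropWhile pvBNotHeading)) := by
  induction ls generalizing secs h curl with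
  | nil => simp [pvALoop, pvBSections]
  | cons l ls ih =>
    by_cases hl : PySem.Str.startswith l "## "
    · have hl' : PySem.Chars.startswith l.toList ['#', '#', ' '] = true := by simpa using hl
      rw [pvALoop, if_pos hl, ih]
      rw [List.takeWhile_cons, List.dropWhile_cons]
      simp [pvBNotHeading, hl', pvBSections]
    · have hl' : PySem.Chars.startswith l.toList ['#', '#', ' '] = false := by simpa using hl
      rw [pvALoop, if_neg hl, ih]
      rw [List.takeWhile_cons, List.dropWhile_cons]
      simp [pvBNotHeading, hl', List.append_assoc]

lemma pvALoop_none (ls : List String) (pre : List String) (secs : List (String × String))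
    (curl : List String) :
    pvALoop ls pre secs none curl =
      (PySem.Str.strip (PySem.Str.join "\n" (pre ++ ls.takeWhile pvBNotHeading)),
       secs ++ pvBSections (ls.dropWhile pvBNotHeading)) := by
  induction ls generalizing pre with
  | nil => simp [pvALoop, pvBSections]
  | cons l ls ih =>
    by_cases hl : PySem.Str.startswith l "## "
    · have hl' : PySem.Chars.startswith l.toList ['#', '#', ' '] = true := by simpa using hl
      rw [pvALoop, if_pos hl, pvALoop_some]
      rw [List.takeWhile_cons, List.dropWhile_cons]
      simp [pvBNotHeading, hl', pvBSections]
    · have hl' : PySem.Chars.startswith l.toList ['#', '#', ' '] = false := by simpa using hl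
      rw [pvALoop, if_neg hl, ih]
      rw [List.takeWhile_cons, List.dropWhile_cons]
      simp [pvBNotHeading, hl']

-- ===== VERDICT (by name: the statement is the Claim_ definition above) =====
theorem split_markdown_level2_sections_py_spec : Claim_equal_split_markdown_level2_sections_py := by
  intro text _
  unfold Spec_split_markdown_level2_sections_py
  unfold split_markdown_level2_sections_py split_markdown_level2_sections_py_alt
  by_cases hn : PySem.Str.strip (PySem.Str.replace text "\r\n" "\n") = ""
  · simp [hn]
  · simp only [hn, if_false]
    rw [pvALoop_none]
    simp
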